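-- pv_equiv track=rewrite | github.com/kartikeya-git/Schrodinger-Equation-Solver | Schrodinger.py | differential
-- ===== SOURCE A (Python) =====
-- def matrix(n):
--     L = []
--     for i in range(n):
--         l = []
--         for i in range(n):
--             l.append(0)
--         L.append(l)
--     return L
--
-- def differential(n):
--     l = matrix(n)
--     for i in range(n):
--         for j in range(n):
--
--             if i == j:
--                 l[i][j] = -2
--
--                 if j + 1 <= n - 1:
--                     l[i][j + 1] = 1
--
--                 if j - 1 >= 0:
--                     l[i][j - 1] = 1
--     return l
-- ===== SOURCE B (Python) =====
-- def differential(n):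
--     return [[-2 if j == i else (1 if abs(i - j) == 1 else 0) for j in range(n)]
--             for i in range(n)]
-- ===== Notes on version B (the rewrite author's own statement) =====
-- stated objective: simpler
-- what changed: B builds each row directly with a nested comprehension computing every entry from |i-j|, replacing A's zero-matrix construction followed by a second n x n scan that mutates the tridiagonal cells in place.
import Mathlib
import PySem

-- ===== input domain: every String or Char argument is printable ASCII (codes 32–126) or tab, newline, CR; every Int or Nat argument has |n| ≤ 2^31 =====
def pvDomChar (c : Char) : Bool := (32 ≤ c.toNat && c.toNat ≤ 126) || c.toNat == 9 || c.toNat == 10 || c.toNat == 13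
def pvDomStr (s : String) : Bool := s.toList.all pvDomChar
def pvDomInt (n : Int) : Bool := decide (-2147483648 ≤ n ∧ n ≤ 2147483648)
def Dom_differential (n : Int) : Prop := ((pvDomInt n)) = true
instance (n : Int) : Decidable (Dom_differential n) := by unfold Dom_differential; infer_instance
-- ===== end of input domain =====

-- B builds each row directly (entry from |i-j|) instead of A's zero-matrix plus a second mutating scan.

-- ===== PORT A =====
-- helper matrix(n): n x n zero matrix built by appending
def pvMatrix (n : Int) : List (List Int) :=
  (PySem.List.pyRange 0 n 1).foldl
    (fun L _ => L ++ [(PySem.List.pyRange 0 n 1).foldl (fun l _ => l ++ [0]) []]) []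

-- l[i][j] = v  (i, j are always nonnegative in-range indices where used, so .toNat is exact)
def pvSet2 (l : List (List Int)) (i j v : Int) : List (List Int) :=
  l.set i.toNat ((l.getD i.toNat []).set j.toNat v)

def differential (n : Int) : List (List Int) :=
  (PySem.List.pyRange 0 n 1).foldl
    (fun l i =>
      (PySem.List.pyRange 0 n 1).foldl
        (fun l j =>
          if i == j then
            let l1 := pvSet2 l i j (-2)
            let l2 := if j + 1 ≤ n - 1 then pvSet2 l1 i (j + 1) 1 else l1
            if j - 1 ≥ 0 then pvSet2 l2 i (j - 1) 1 else l2
          else l)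
        l)
    (pvMatrix n)

-- ===== PORT B =====
def differential_alt (n : Int) : List (List Int) :=
  (PySem.List.pyRange 0 n 1).map (fun i =>
    (PySem.List.pyRange 0 n 1).map (fun j =>
      if j == i then -2 else if (i - j).natAbs == 1 then 1 else 0))

-- ===== PRECONDITION & SPEC =====
def Spec_differential (n : Int) (out : List (List Int)) : Prop := out = differential_alt n
instance (n : Int) (out : List (List Int)) : Decidable (Spec_differential n out) := by unfold Spec_differential; infer_instance

-- ===== CLAIM (what is proved, stated in full; the proofs are below) =====
def Claim_equal_differential : Prop := ∀ (n : Int), Dom_differential n → Spec_differential n (differential n)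

-- ===== LEMMAS AND PROOFS =====


-- Nat-indexed entry of the tridiagonal matrix
def pvEntry (i j : Nat) : Int :=
  if (j : Int) == (i : Int) then -2 else if ((i : Int) - (j : Int)).natAbs == 1 then 1 else 0

def pvRow (N i : Nat) : List Int := (List.range N).map (fun j => pvEntry i j)

def pvZeroRow (N : Nat) : List Int := (List.range N).map (fun _ => 0)

-- the state after the first m outer iterations
def pvPartial (N m : Nat) : List (List Int) :=
  (List.range N).map (fun i => if i < m then pvRow N i else pvZeroRow N)

theorem pvAlt_eq (N : Nat) :
    differential_alt (N : Int) = (List.range N).map (fun i => pvRow N i) := by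
  simp [differential_alt, PySem.List.pyRange_zero_natCast, List.map_map, pvRow, pvEntry,
    Function.comp]

theorem pvMatrix_eq (N : Nat) : pvMatrix (N : Int) = pvPartial N 0 := by
  unfold pvMatrix
  rw [PySem.List.foldl_append_singleton_eq_map
        (fun _ => (PySem.List.pyRange 0 (N : Int) 1).foldl (fun l _ => l ++ [(0 : Int)]) [])]
  have hin : (PySem.List.pyRange 0 (N : Int) 1).foldl (fun l _ => l ++ [(0 : Int)]) []
      = pvZeroRow N := by
    rw [PySem.List.foldl_append_singleton_eq_map (fun _ => (0 : Int))]
    simp [pvZeroRow, PySem.List.pyRange_zero_natCast, List.map_map, Function.comp_def,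
      List.map_const']
  simp only [hin]
  simp [pvPartial, PySem.List.pyRange_zero_natCast, List.map_map, Function.comp_def,
    List.map_const']

theorem pvFilter_range (N m : Nat) (hm : m < N) :
    ((List.range N).map (fun k : Nat => (k : Int))).filter (fun k => ((m : Int)) == k)
      = [(m : Int)] := by
  induction N with
  | zero => omega
  | succ N ih =>
    rw [List.range_succ, List.map_append, List.filter_append]
    rcases Nat.lt_or_ge m N with h | h
    · rw [ih h]
      have : ((m : Int) == (N : Int)) = false := by
        simp only [beq_eq_false_iff_ne, ne_eq, Int.natCast_inj]
        omega
      simp [this]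
    · have hmN : m = N := by omega
      subst hmN
      have h0 : ((List.range m).map (fun k : Nat => (k : Int))).filter
          (fun k => ((m : Int)) == k) = [] := by
        apply List.filter_eq_nil_iff.mpr
        intro a ha
        simp only [List.mem_map, List.mem_range] at ha
        obtain ⟨k, hk, rfl⟩ := ha
        simp only [beq_eq_false_iff_ne, ne_eq, Int.natCast_inj, Bool.not_eq_true,
          beq_eq_false_iff_ne]
        omega
      rw [h0]
      simp

theorem pvRowStep (N m : Nat) (hm : m < N) :
    (if ((m : Int)) - 1 ≥ 0 then
      ((if ((m : Int)) + 1 ≤ (N : Int) - 1 then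
          ((pvZeroRow N).set m (-2)).set (m + 1) 1
        else (pvZeroRow N).set m (-2))).set (m - 1) 1
     else
      (if ((m : Int)) + 1 ≤ (N : Int) - 1 then
          ((pvZeroRow N).set m (-2)).set (m + 1) 1
        else (pvZeroRow N).set m (-2))) = pvRow N m := by
  apply List.ext_getElem
  · simp [pvZeroRow, pvRow]
    split_ifs <;> simp
  · intro j h1 h2
    have hj : j < N := by simpa [pvRow] using h2
    simp only [pvRow, pvZeroRow, List.getElem_map, List.getElem_range, pvEntry]
    split_ifs with hc1 hc2 hc2 <;>
      simp only [List.getElem_set, List.getElem_map] <;>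
      split_ifs <;> simp_all <;> omega

theorem pvSetRow (N m : Nat) (r : List Int) :
    (pvPartial N m).set m r
      = (List.range N).map (fun i => if i = m then r else if i < m then pvRow N i else pvZeroRow N) := by
  apply List.ext_getElem
  · simp [pvPartial]
  · intro k h1 h2
    simp only [pvPartial, List.getElem_set, List.getElem_map, List.getElem_range]
    by_cases h : m = k
    · simp [h]
    · simp [h, Ne.symm h]

theorem pvStep (N m : Nat) (hm : m < N) :
    (PySem.List.pyRange 0 (N : Int) 1).foldl
      (fun l j =>
        if ((m : Int)) == j then
          let l1 := pvSet2 l (m : Int) j (-2)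
          let l2 := if j + 1 ≤ (N : Int) - 1 then pvSet2 l1 (m : Int) (j + 1) 1 else l1
          if j - 1 ≥ 0 then pvSet2 l2 (m : Int) (j - 1) 1 else l2
        else l)
      (pvPartial N m) = pvPartial N (m + 1) := by
  rw [PySem.List.pyRange_zero_natCast,
    PySem.List.foldl_if_eq_foldl_filter (fun j => ((m : Int)) == j)
      (fun l j =>
        let l1 := pvSet2 l (m : Int) j (-2)
        let l2 := if j + 1 ≤ (N : Int) - 1 then pvSet2 l1 (m : Int) (j + 1) 1 else l1
        if j - 1 ≥ 0 then pvSet2 l2 (m : Int) (j - 1) 1 else l2),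
    pvFilter_range N m hm]
  simp only [List.foldl_cons, List.foldl_nil]
  have hlen : (pvPartial N m).length = N := by simp [pvPartial]
  have hz : (pvPartial N m).getD m [] = pvZeroRow N := by
    rw [pvPartial, PySem.List.getD_map_range _ N m _ hm]
    simp
  have ht1 : ((m : Int)).toNat = m := by omega
  have ht2 : (((m : Int)) + 1).toNat = m + 1 := by omega
  have ht3 : (((m : Int)) - 1).toNat = m - 1 := by omega
  have hget : ∀ r : List Int, ((pvPartial N m).set m r).getD m [] = r := by
    intro r
    have hmlen : m < ((pvPartial N m).set m r).length := by simp [hlen, hm]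
    rw [List.getD_eq_getElem _ _ hmlen]
    simp
  have hss : ∀ r r' : List Int, ((pvPartial N m).set m r).set m r' = (pvPartial N m).set m r' :=
    fun r r' => List.set_set ..
  have hfin : (pvPartial N m).set m (pvRow N m) = pvPartial N (m + 1) := by
    rw [pvSetRow N m]
    apply List.map_congr_left
    intro i _
    split_ifs <;> simp_all <;> omega
  have hrow := pvRowStep N m hm
  by_cases h1 : ((m : Int)) + 1 ≤ (N : Int) - 1 <;> by_cases h2 : ((m : Int)) - 1 ≥ 0 <;>
    simp only [pvSet2, ht1, ht2, ht3, hz, hget, hss, h1, h2, if_pos, if_neg,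
      not_false_iff] at hrow ⊢ <;>
    rw [hrow] at * <;> exact hfin
theorem differential_eq (n : Int) : differential n = differential_alt n := by
  by_cases hn : n ≤ 0
  · have h := PySem.List.pyRange_one_eq_nil (a := 0) (b := n) hn
    simp [differential, differential_alt, pvMatrix, h]
  · push Not at hn
    obtain ⟨N, rfl⟩ : ∃ N : Nat, n = (N : Int) :=
      ⟨n.toNat, (Int.toNat_of_nonneg (le_of_lt hn)).symm⟩
    unfold differential
    rw [pvMatrix_eq]
    have key : ∀ m, m ≤ N →
        ((List.range m).map (fun k : Nat => (k : Int))).foldl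
          (fun l i =>
            (PySem.List.pyRange 0 (N : Int) 1).foldl
              (fun l j =>
                if i == j then
                  let l1 := pvSet2 l i j (-2)
                  let l2 := if j + 1 ≤ (N : Int) - 1 then pvSet2 l1 i (j + 1) 1 else l1
                  if j - 1 ≥ 0 then pvSet2 l2 i (j - 1) 1 else l2
                else l)
              l)
          (pvPartial N 0) = pvPartial N m := by
      intro m hm
      induction m with
      | zero => rfl
      | succ m ih =>
        rw [List.range_succ, List.map_append, List.foldl_append, ih (by omega)]
        simpa using pvStep N m (by omega)
    have := key N le_rfl
    rw [PySem.List.pyRange_zero_natCast] at this ⊢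
    rw [this, pvAlt_eq]
    unfold pvPartial
    apply List.map_congr_left
    intro i hi
    simp only [List.mem_range] at hi
    simp [hi]

-- ===== VERDICT (by name: the statement is the Claim_ definition above) =====
theorem differential_spec : Claim_equal_differential := by
  intro n _
  unfold Spec_differential
  exact differential_eq n
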